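-- pv_equiv track=rewrite | github.com/sparsha-p/Capstone1 | src/finalnlp.py | split_facts
-- ===== SOURCE A (Python) =====
-- def split_facts(allFacts):
--   conditionals = list()
--   facts = list()
--   for expr in allFacts:
--     if ( '-' in expr):
--       conditionals.append(expr)
--     else:
--       facts.append(expr)
--   return [conditionals , facts]
-- ===== SOURCE B (Python) =====
-- def split_facts(allFacts):
--   def part(lo, hi):
--     if hi - lo == 0:
--       return [], []
--     if hi - lo == 1:
--       e = allFacts[lo]
--       return ([e], []) if '-' in e else ([], [e])
--     mid = (lo + hi) // 2
--     c1, f1 = part(lo, mid)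
--     c2, f2 = part(mid, hi)
--     return c1 + c2, f1 + f2
--   conditionals, facts = part(0, len(allFacts))
--   return [conditionals, facts]
-- ===== Notes on version B (the rewrite author's own statement) =====
-- stated objective: alternative
-- what changed: Replaces A's single accumulate-into-two-buckets loop with a divide-and-conquer recursion that halves the index range, partitions each half independently and concatenates the stable sub-partitions.
import Mathlib
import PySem

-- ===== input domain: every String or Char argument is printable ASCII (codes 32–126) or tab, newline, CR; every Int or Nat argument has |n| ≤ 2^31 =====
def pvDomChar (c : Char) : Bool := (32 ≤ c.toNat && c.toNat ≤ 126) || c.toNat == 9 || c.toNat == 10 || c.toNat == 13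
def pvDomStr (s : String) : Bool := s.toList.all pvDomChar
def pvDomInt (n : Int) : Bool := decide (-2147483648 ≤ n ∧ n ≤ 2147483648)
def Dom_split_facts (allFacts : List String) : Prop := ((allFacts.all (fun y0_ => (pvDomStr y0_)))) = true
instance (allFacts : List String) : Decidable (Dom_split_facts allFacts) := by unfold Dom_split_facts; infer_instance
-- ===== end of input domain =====

-- B replaces A's single accumulating loop with a divide-and-conquer recursion over the index range (alternative decomposition).

-- ===== PORT A =====
-- one pass: fold appending each expr into conditionals or facts
def split_facts (allFacts : List String) : List (List String) :=
  let st := allFacts.foldl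
    (fun (st : List String × List String) expr =>
      if PySem.Str.isIn "-" expr then (st.1 ++ [expr], st.2)
      else (st.1, st.2 ++ [expr]))
    ([], [])
  [st.1, st.2]

-- ===== PORT B =====
-- divide and conquer on the index range [lo, hi); allFacts[lo] with lo always in range (Python allFacts[lo])
def split_facts_part (allFacts : List String) (lo hi : Nat) : List String × List String :=
  if hi - lo = 0 then ([], [])
  else if hi - lo = 1 then
    let e := allFacts.getD lo ""
    if PySem.Str.isIn "-" e then ([e], []) else ([], [e])
  else
    let mid := (lo + hi) / 2
    let cf1 := split_facts_part allFacts lo mid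
    let cf2 := split_facts_part allFacts mid hi
    (cf1.1 ++ cf2.1, cf1.2 ++ cf2.2)
termination_by hi - lo
decreasing_by all_goals omega

def split_facts_alt (allFacts : List String) : List (List String) :=
  let cf := split_facts_part allFacts 0 allFacts.length
  [cf.1, cf.2]

-- ===== PRECONDITION & SPEC =====
def Spec_split_facts (allFacts : List String) (out : List (List String)) : Prop := out = split_facts_alt allFacts
instance (allFacts : List String) (out : List (List String)) : Decidable (Spec_split_facts allFacts out) := by unfold Spec_split_facts; infer_instance

-- ===== CLAIM (what is proved, stated in full; the proofs are below) =====
def Claim_equal_split_facts : Prop := ∀ (allFacts : List String), Dom_split_facts allFacts → Spec_split_facts allFacts (split_facts allFacts)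

-- ===== LEMMAS AND PROOFS =====
-- A's fold accumulates the two complementary filters.
theorem split_facts_fold_inv (p : String → Bool) (allFacts c f : List String) :
    allFacts.foldl
      (fun (st : List String × List String) expr =>
        if p expr then (st.1 ++ [expr], st.2)
        else (st.1, st.2 ++ [expr])) (c, f)
    = (c ++ allFacts.filter p, f ++ allFacts.filter (fun e => !p e)) := by
  induction allFacts generalizing c f with
  | nil => simp
  | cons x xs ih =>
    by_cases h : p x = true <;>
      simp [List.foldl_cons, h, ih, List.append_assoc]

-- B's divide-and-conquer computes the same two filters of the segment [lo, hi).
theorem split_facts_part_eq (allFacts : List String) :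
    ∀ (n lo hi : Nat), hi - lo ≤ n → hi ≤ allFacts.length →
    split_facts_part allFacts lo hi
      = (((allFacts.drop lo).take (hi - lo)).filter (fun e => PySem.Str.isIn "-" e),
         ((allFacts.drop lo).take (hi - lo)).filter (fun e => !PySem.Str.isIn "-" e)) := by
  intro n
  induction n with
  | zero =>
    intro lo hi h _
    have h0 : hi - lo = 0 := by omega
    rw [split_facts_part]
    simp [h0]
  | succ n ih =>
    intro lo hi h hle
    rw [split_facts_part]
    by_cases h0 : hi - lo = 0
    · simp [h0]
    · by_cases h1 : hi - lo = 1
      · have hlt : lo < allFacts.length := by omega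
        have hgd : allFacts.getD lo "" = allFacts[lo] := List.getD_eq_getElem _ _ hlt
        rw [if_neg h0, if_pos h1, h1, List.drop_eq_getElem_cons hlt, List.take_succ_cons,
            List.take_zero, hgd]
        by_cases hp : PySem.Str.isIn "-" allFacts[lo] = true
        · rw [if_pos hp]; simp [PySem.Str.isIn] at hp; simp [PySem.Str.isIn, hp]
        · rw [if_neg hp]; simp [PySem.Str.isIn] at hp; simp [PySem.Str.isIn, hp]
      · have h2 : 2 ≤ hi - lo := by omega
        simp only [h0, h1, if_false]
        have hm1 : (lo + hi) / 2 - lo ≤ n := by omega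
        have hm2 : hi - (lo + hi) / 2 ≤ n := by omega
        have hmle : (lo + hi) / 2 ≤ allFacts.length := by omega
        rw [ih lo ((lo + hi) / 2) hm1 hmle, ih ((lo + hi) / 2) hi hm2 hle]
        have hsplit : (allFacts.drop lo).take (hi - lo)
            = (allFacts.drop lo).take ((lo + hi) / 2 - lo)
              ++ (allFacts.drop ((lo + hi) / 2)).take (hi - (lo + hi) / 2) := by
          rw [show hi - lo = ((lo + hi) / 2 - lo) + (hi - (lo + hi) / 2) by omega,
              List.take_add, List.drop_drop,
              show lo + ((lo + hi) / 2 - lo) = (lo + hi) / 2 by omega]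
        rw [hsplit]
        simp [List.filter_append]

-- ===== VERDICT (by name: the statement is the Claim_ definition above) =====
theorem split_facts_spec : Claim_equal_split_facts := by
  intro allFacts _
  show split_facts allFacts = split_facts_alt allFacts
  unfold split_facts split_facts_alt
  rw [split_facts_fold_inv (fun e => PySem.Str.isIn "-" e) allFacts [] [],
      split_facts_part_eq allFacts allFacts.length 0 allFacts.length (by omega) (le_refl _)]
  simp
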